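-- pv_equiv track=rewrite | github.com/SanketGangil/Delhi-Metro-Route-Finder- | metro_graph.py | get_smart_path
-- ===== SOURCE A (Python) =====
-- def get_smart_path(full_path):
--     """
--     Condenses a long path into just: Start -> Interchanges -> End.
--     It adds context (previous/next station) around interchanges.
--     """
--     if not full_path:
--         return []
--
--     smart_path = []
--     n = len(full_path)
--
--     # Always add the starting station
--     smart_path.append(full_path[0])
--
--     for i in range(1, n - 1):
--         prev_node = full_path[i-1]
--         curr_node = full_path[i]
--         next_node = full_path[i+1]
--
--         # Detect Interchange: Line changes between previous and current
--         # OR between current and next.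
--         prev_line = prev_node['line']
--         curr_line = curr_node['line']
--         next_line = next_node['line']
--
--         is_interchange = (curr_line != prev_line) or (curr_line != next_line)
--
--         # Context Logic: You asked to show "Rajiv Chowk (Blue) -> Rajiv Chowk (Yellow)"
--         # My logic in 'dijkstra' already stores them as separate steps if the node is visited
--         # on different lines.
--
--         # If it's an interchange, or the immediate neighbor of an interchange, we keep it.
--         # But to keep it simple as per your request "Interchanges Only":
--
--         if is_interchange:
--             # Check if we already added this station (to avoid duplicates)
--             if smart_path[-1]['station'] != curr_node['station']:
--                 smart_path.append(curr_node)
--             elif smart_path[-1]['line'] != curr_node['line']: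
--                 # Same station, different line (The explicit switch you wanted)
--                 smart_path.append(curr_node)
--
--     # Always add the destination
--     if smart_path[-1]['station'] != full_path[-1]['station']:
--         smart_path.append(full_path[-1])
--
--     return smart_path
-- ===== SOURCE B (Python) =====
-- def get_smart_path(full_path):
--     # Edge-centric: every line change between consecutive stations is an interchange
--     # edge; emit both endpoints of each such edge (clipped to the interior), deduplicating
--     # against the last kept node, then close with the destination.
--     if not full_path:
--         return []
--     n = len(full_path)
--     last = full_path[-1]
--
--     def emit(smart, node):
--         top = smart[-1]
--         if top['station'] != node['station'] or top['line'] != node['line']: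
--             smart.append(node)
--
--     smart = [full_path[0]]
--     if n >= 3 and full_path[1]['line'] != full_path[0]['line']:
--         emit(smart, full_path[1])
--     for i in range(2, n):
--         p, c = full_path[i - 1], full_path[i]
--         if c['line'] != p['line']:
--             emit(smart, p)
--             if i <= n - 2:
--                 emit(smart, c)
--     if smart[-1]['station'] != last['station']:
--         smart.append(last)
--     return smart
-- ===== Notes on version B (the rewrite author's own statement) =====
-- stated objective: alternative
-- what changed: A is node-centric (for each interior node it tests both neighbours' lines and conditionally appends that node); B is edge-centric: it scans consecutive PAIRS, and every line-change edge emits BOTH of its endpoints (clipped to the interior) through an idempotent dedup emitter, so a node is never tested against its two neighbours at once and may be emitted via two different edges.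
import Mathlib
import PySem

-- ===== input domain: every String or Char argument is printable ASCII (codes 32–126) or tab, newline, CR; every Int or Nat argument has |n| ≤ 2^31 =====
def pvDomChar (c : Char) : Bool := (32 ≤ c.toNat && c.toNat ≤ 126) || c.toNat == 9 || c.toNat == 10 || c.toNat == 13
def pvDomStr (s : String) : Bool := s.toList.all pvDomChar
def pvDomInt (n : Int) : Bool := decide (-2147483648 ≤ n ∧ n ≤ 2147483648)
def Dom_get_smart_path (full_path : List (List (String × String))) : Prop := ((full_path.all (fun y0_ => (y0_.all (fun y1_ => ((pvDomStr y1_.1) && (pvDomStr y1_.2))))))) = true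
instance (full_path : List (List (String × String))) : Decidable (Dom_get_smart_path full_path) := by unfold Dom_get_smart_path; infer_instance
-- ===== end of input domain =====

-- B replaces A's node-centric interior loop (test each node against both neighbours) by an
-- edge-centric pass: each line-change edge emits both of its endpoints through an idempotent
-- dedup emitter; objective: alternative structure, same cost.

-- ===== PORT A =====
-- node['k'] : first-match association lookup; Pre_ guarantees the key is present, so the "" default
-- is never taken on admitted inputs (Python raises KeyError exactly when the key is absent).
def pvKey (d : List (String × String)) (k : String) : String :=
  ((PySem.Dict.mk d).get? k).getD ""

-- the body of A's 'for i in range(1, n - 1)' loop, verbatim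
def pvLoopBody (full_path : List (List (String × String)))
    (smart_path : List (List (String × String))) (i : Int) : List (List (String × String)) :=
  let prev_node := PySem.List.pyGetD full_path (i - 1) []
  let curr_node := PySem.List.pyGetD full_path i []
  let next_node := PySem.List.pyGetD full_path (i + 1) []
  let prev_line := pvKey prev_node "line"
  let curr_line := pvKey curr_node "line"
  let next_line := pvKey next_node "line"
  if curr_line ≠ prev_line ∨ curr_line ≠ next_line then
    if pvKey (PySem.List.pyGetD smart_path (-1) []) "station" ≠ pvKey curr_node "station" then
      smart_path ++ [curr_node]
    else if pvKey (PySem.List.pyGetD smart_path (-1) []) "line" ≠ pvKey curr_node "line" then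
      smart_path ++ [curr_node]
    else smart_path
  else smart_path

def get_smart_path (full_path : List (List (String × String))) : List (List (String × String)) :=
  if full_path = [] then []
  else
    let n : Int := full_path.length
    let smart_path : List (List (String × String)) := [PySem.List.pyGetD full_path 0 []]
    let smart_path := (PySem.List.pyRange 1 (n - 1) 1).foldl (pvLoopBody full_path) smart_path
    if pvKey (PySem.List.pyGetD smart_path (-1) []) "station"
         ≠ pvKey (PySem.List.pyGetD full_path (-1) []) "station" then
      smart_path ++ [PySem.List.pyGetD full_path (-1) []]
    else smart_path

-- ===== PORT B =====
-- Source B's emit helper: append node unless the last kept node matches it in station and line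
def pvEmit (smart : List (List (String × String))) (node : List (String × String)) :
    List (List (String × String)) :=
  if pvKey (PySem.List.pyGetD smart (-1) []) "station" ≠ pvKey node "station"
     ∨ pvKey (PySem.List.pyGetD smart (-1) []) "line" ≠ pvKey node "line" then
    smart ++ [node]
  else smart

-- the body of Source B's 'for i in range(2, n)' loop, verbatim
def pvBLoop (full_path : List (List (String × String)))
    (smart : List (List (String × String))) (i : Int) : List (List (String × String)) :=
  let p := PySem.List.pyGetD full_path (i - 1) []
  let c := PySem.List.pyGetD full_path i []
  if pvKey c "line" ≠ pvKey p "line" then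
    let smart := pvEmit smart p
    if i ≤ (full_path.length : Int) - 2 then pvEmit smart c else smart
  else smart

def get_smart_path_alt (full_path : List (List (String × String))) : List (List (String × String)) :=
  if full_path = [] then []
  else
    let n : Int := full_path.length
    let lastN := PySem.List.pyGetD full_path (-1) []
    let smart : List (List (String × String)) := [PySem.List.pyGetD full_path 0 []]
    let smart :=
      if 3 ≤ n ∧ pvKey (PySem.List.pyGetD full_path 1 []) "line"
                   ≠ pvKey (PySem.List.pyGetD full_path 0 []) "line"
      then pvEmit smart (PySem.List.pyGetD full_path 1 []) else smart
    let smart := (PySem.List.pyRange 2 n 1).foldl (pvBLoop full_path) smart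
    if pvKey (PySem.List.pyGetD smart (-1) []) "station" ≠ pvKey lastN "station" then
      smart ++ [lastN]
    else smart

-- ===== PRECONDITION & SPEC =====
-- Pre_ admits exactly the inputs on which Python A returns: every key A actually reads must be
-- present (with ≤ 2 nodes only the endpoint 'station' keys; with ≥ 3 nodes every 'line' key, the
-- first and last 'station' keys, and the 'station' key of every interior interchange node);
-- anywhere outside, A raises KeyError.
def Pre_get_smart_path (full_path : List (List (String × String))) : Prop :=
  (full_path.length ≤ 2 → ∀ node ∈ full_path, (PySem.Dict.mk node).contains "station" = true)
  ∧ (3 ≤ full_path.length →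
      (∀ node ∈ full_path, (PySem.Dict.mk node).contains "line" = true)
      ∧ (∀ node ∈ full_path.take 1, (PySem.Dict.mk node).contains "station" = true)
      ∧ (PySem.Dict.mk (full_path.getLastD [])).contains "station" = true
      ∧ (∀ tr ∈ full_path.zip ((full_path.drop 1).zip (full_path.drop 2)),
          (pvKey tr.2.1 "line" ≠ pvKey tr.1 "line" ∨ pvKey tr.2.1 "line" ≠ pvKey tr.2.2 "line") →
          (PySem.Dict.mk tr.2.1).contains "station" = true))
instance (full_path : List (List (String × String))) : Decidable (Pre_get_smart_path full_path) := by
  unfold Pre_get_smart_path; infer_instance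

def pvWitness_get_smart_path : (List (List (String × String))) :=
  [[("station", "A"), ("line", "Blue")],
   [("station", "B"), ("line", "Blue")],
   [("station", "B"), ("line", "Yellow")],
   [("station", "C"), ("line", "Yellow")]]

def Spec_get_smart_path (full_path : List (List (String × String))) (out : List (List (String × String))) : Prop := out = get_smart_path_alt full_path
instance (full_path : List (List (String × String))) (out : List (List (String × String))) : Decidable (Spec_get_smart_path full_path out) := by unfold Spec_get_smart_path; infer_instance

-- ===== CLAIM (what is proved, stated in full; the proofs are below) =====
def Claim_equal_get_smart_path : Prop := ∀ (full_path : List (List (String × String))), Dom_get_smart_path full_path → Pre_get_smart_path full_path → Spec_get_smart_path full_path (get_smart_path full_path)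

-- ===== LEMMAS AND PROOFS =====

-- A's loop body with the three indexed reads abstracted into the window (prev, curr, next)
def pvStepA (s : List (List (String × String))) (pr cu nx : List (String × String)) :
    List (List (String × String)) :=
  if pvKey cu "line" ≠ pvKey pr "line" ∨ pvKey cu "line" ≠ pvKey nx "line" then
    if pvKey (PySem.List.pyGetD s (-1) []) "station" ≠ pvKey cu "station" then s ++ [cu]
    else if pvKey (PySem.List.pyGetD s (-1) []) "line" ≠ pvKey cu "line" then s ++ [cu]
    else s
  else s

-- (prev, curr, next) windows of the path
def pvTriples (fp : List (List (String × String))) :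
    List ((List (String × String)) × (List (String × String)) × (List (String × String))) :=
  fp.zip ((fp.drop 1).zip (fp.drop 2))

-- B's loop as structural recursion over the suffix starting at the left endpoint of the edge
def pvWalkB (s : List (List (String × String))) :
    List (List (String × String)) → List (List (String × String))
  | p :: c :: rest =>
      pvWalkB
        (if pvKey c "line" ≠ pvKey p "line" then
           let s := pvEmit s p
           if rest ≠ [] then pvEmit s c else s
         else s) (c :: rest)
  | _ => s

lemma pvLoopBody_eq (fp : List (List (String × String))) :
    pvLoopBody fp = fun s i => pvStepA s (PySem.List.pyGetD fp (i - 1) [])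
      (PySem.List.pyGetD fp i []) (PySem.List.pyGetD fp (i + 1) []) := rfl

lemma pvShift (a : List (String × String)) (l : List (List (String × String))) (j : Int)
    (d : List (String × String)) (h : 1 ≤ j) :
    PySem.List.pyGetD (a :: l) j d = PySem.List.pyGetD l (j - 1) d := by
  have h1 : (0:Int) ≤ j := by omega
  have h2 : (0:Int) ≤ j - 1 := by omega
  simp only [PySem.List.pyGetD, PySem.List.pyGet?_of_nonneg _ h1, PySem.List.pyGet?_of_nonneg _ h2]
  have hj : j.toNat = (j-1).toNat + 1 := by omega
  rw [hj]; simp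

lemma pvGetD_zero (x : List (String × String)) (l : List (List (String × String)))
    (d : List (String × String)) : PySem.List.pyGetD (x :: l) 0 d = x := by
  simp [PySem.List.pyGetD]

lemma pvLastEq (s : List (List (String × String))) (h : s ≠ []) (d d' : List (String × String)) :
    PySem.List.pyGetD s (-1) d = s.getLastD d' := by
  simp only [PySem.List.pyGetD, PySem.List.pyGet?_neg_one]
  obtain ⟨y, hy⟩ := Option.isSome_iff_exists.mp (List.getLast?_isSome.mpr h)
  rw [hy]
  simp [List.getLastD_eq_getLast?, hy]

lemma pvFoldRangeShift (f g : List (List (String × String)) → Int → List (List (String × String)))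
    (aLo bHi : Int)
    (hfg : ∀ s (j : Int), aLo ≤ j → f s (j + 1) = g s j)
    (acc : List (List (String × String))) :
    (PySem.List.pyRange (aLo + 1) (bHi + 1) 1).foldl f acc
      = (PySem.List.pyRange aLo bHi 1).foldl g acc := by
  rw [PySem.List.pyRange_one (aLo+1) (bHi+1), PySem.List.pyRange_one aLo bHi]
  have he : (bHi + 1 - (aLo + 1)).toNat = (bHi - aLo).toNat := by omega
  rw [he, List.foldl_map, List.foldl_map]
  congr 1
  funext s k
  calc f s (aLo + 1 + (k:Int)) = f s (aLo + (k:Int) + 1) := by ring_nf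
    _ = g s (aLo + (k:Int)) := hfg s (aLo + (k : Int)) (by omega)

-- A's index fold over range(1, n-1) equals the fold of pvStepA over the windows
lemma pvFoldIdx (t : List (List (String × String))) :
    ∀ (a b : List (String × String)) (acc : List (List (String × String))),
    (PySem.List.pyRange 1 (((a :: b :: t).length : Int) - 1) 1).foldl (pvLoopBody (a :: b :: t)) acc
      = (pvTriples (a :: b :: t)).foldl (fun s tr => pvStepA s tr.1 tr.2.1 tr.2.2) acc := by
  induction t with
  | nil =>
      intro a b acc
      rw [PySem.List.pyRange_one_eq_nil (by norm_num)]
      simp [pvTriples]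
  | cons c t' ih =>
      intro a b acc
      have hlen : (((a :: b :: c :: t').length : Int) - 1) = (((t'.length : Int) + 1) + 1) := by
        push_cast [List.length_cons]; ring
      rw [hlen, PySem.List.pyRange_one_cons (by omega)]
      have htri : pvTriples (a :: b :: c :: t') = (a, (b, c)) :: pvTriples (b :: c :: t') := by
        simp [pvTriples]
      rw [htri]
      simp only [List.foldl_cons]
      have e1 : PySem.List.pyGetD (a :: b :: c :: t') 1 [] = b := by
        rw [pvShift _ _ 1 _ le_rfl, show (1 : Int) - 1 = 0 by norm_num, pvGetD_zero]
      have e2 : PySem.List.pyGetD (a :: b :: c :: t') 2 [] = c := by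
        rw [pvShift _ _ 2 _ (by norm_num), show (2 : Int) - 1 = 1 by norm_num,
            pvShift _ _ 1 _ le_rfl, show (1 : Int) - 1 = 0 by norm_num, pvGetD_zero]
      have hb1 : pvLoopBody (a :: b :: c :: t') acc 1 = pvStepA acc a b c := by
        rw [pvLoopBody_eq]
        simp only [show (1 : Int) - 1 = 0 by norm_num, show (1 : Int) + 1 = 2 by norm_num,
          pvGetD_zero, e1, e2]
      rw [hb1]
      have hshift : (PySem.List.pyRange (1 + 1) (((t'.length : Int) + 1) + 1) 1).foldl
          (pvLoopBody (a :: b :: c :: t')) (pvStepA acc a b c)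
          = (PySem.List.pyRange 1 ((t'.length : Int) + 1) 1).foldl
              (pvLoopBody (b :: c :: t')) (pvStepA acc a b c) := by
        apply pvFoldRangeShift
        intro s j hj
        rw [pvLoopBody_eq, pvLoopBody_eq]
        simp only
        have ha : PySem.List.pyGetD (a :: b :: c :: t') (j + 1 - 1) []
            = PySem.List.pyGetD (b :: c :: t') (j - 1) [] := by
          rw [show j + 1 - 1 = j by ring, pvShift _ _ j _ (by omega)]
        have hbb : PySem.List.pyGetD (a :: b :: c :: t') (j + 1) []
            = PySem.List.pyGetD (b :: c :: t') j [] := by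
          rw [pvShift _ _ (j + 1) _ (by omega), show j + 1 - 1 = j by ring]
        have hc : PySem.List.pyGetD (a :: b :: c :: t') (j + 1 + 1) []
            = PySem.List.pyGetD (b :: c :: t') (j + 1) [] := by
          rw [pvShift _ _ (j + 1 + 1) _ (by omega), show j + 1 + 1 - 1 = j + 1 by ring]
        rw [ha, hbb, hc]
      rw [hshift]
      have hlen2 : (((b :: c :: t').length : Int) - 1) = ((t'.length : Int) + 1) := by
        push_cast [List.length_cons]; ring
      have := ih b c (pvStepA acc a b c)
      rw [hlen2] at this
      exact this

-- B's index fold over range(2, n) equals pvWalkB over the suffix starting at index 1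
lemma pvFoldIdxB (t : List (List (String × String))) :
    ∀ (a b : List (String × String)) (acc : List (List (String × String))),
    (PySem.List.pyRange 2 ((a :: b :: t).length : Int) 1).foldl (pvBLoop (a :: b :: t)) acc
      = pvWalkB acc (b :: t) := by
  induction t with
  | nil =>
      intro a b acc
      rw [show ((( a :: b :: ([] : List (List (String × String)))).length : Int)) = 2 by simp]
      rw [PySem.List.pyRange_one_eq_nil le_rfl]
      simp [pvWalkB]
  | cons c t' ih =>
      intro a b acc
      have hlen : (((a :: b :: c :: t').length : Int)) = (((t'.length : Int) + 2) + 1) := by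
        push_cast [List.length_cons]; ring
      rw [hlen, PySem.List.pyRange_one_cons (by omega)]
      simp only [List.foldl_cons]
      have e1 : PySem.List.pyGetD (a :: b :: c :: t') 1 [] = b := by
        rw [pvShift _ _ 1 _ le_rfl, show (1 : Int) - 1 = 0 by norm_num, pvGetD_zero]
      have e2 : PySem.List.pyGetD (a :: b :: c :: t') 2 [] = c := by
        rw [pvShift _ _ 2 _ (by norm_num), show (2 : Int) - 1 = 1 by norm_num,
            pvShift _ _ 1 _ le_rfl, show (1 : Int) - 1 = 0 by norm_num, pvGetD_zero]
      have hb2 : pvBLoop (a :: b :: c :: t') acc 2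
          = (if pvKey c "line" ≠ pvKey b "line" then
               let s := pvEmit acc b
               if t' ≠ [] then pvEmit s c else s
             else acc) := by
        unfold pvBLoop
        simp only [show (2 : Int) - 1 = 1 by norm_num, e1, e2]
        have hcond : (2 ≤ ((a :: b :: c :: t').length : Int) - 2) ↔ (t' ≠ []) := by
          rw [hlen]
          cases t' with
          | nil => simp
          | cons u t'' => simp; omega
        split_ifs with h1 h2 h3 <;> simp_all
      rw [hb2]
      have hwalk : pvWalkB acc (b :: c :: t')
          = pvWalkB (if pvKey c "line" ≠ pvKey b "line" then
               let s := pvEmit acc b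
               if t' ≠ [] then pvEmit s c else s
             else acc) (c :: t') := rfl
      rw [hwalk]
      set acc2 := (if pvKey c "line" ≠ pvKey b "line" then
               let s := pvEmit acc b
               if t' ≠ [] then pvEmit s c else s
             else acc) with hacc2
      have hshift : (PySem.List.pyRange (2 + 1) (((t'.length : Int) + 2) + 1) 1).foldl
          (pvBLoop (a :: b :: c :: t')) acc2
          = (PySem.List.pyRange 2 ((t'.length : Int) + 2) 1).foldl (pvBLoop (b :: c :: t')) acc2 := by
        apply pvFoldRangeShift
        intro s j hj
        unfold pvBLoop
        have ha : PySem.List.pyGetD (a :: b :: c :: t') (j + 1 - 1) []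
            = PySem.List.pyGetD (b :: c :: t') (j - 1) [] := by
          rw [show j + 1 - 1 = j by ring, pvShift _ _ j _ (by omega)]
        have hbb : PySem.List.pyGetD (a :: b :: c :: t') (j + 1) []
            = PySem.List.pyGetD (b :: c :: t') j [] := by
          rw [pvShift _ _ (j + 1) _ (by omega), show j + 1 - 1 = j by ring]
        have hn : (j + 1 ≤ ((a :: b :: c :: t').length : Int) - 2)
            ↔ (j ≤ ((b :: c :: t').length : Int) - 2) := by
          push_cast [List.length_cons]; omega
        simp only [ha, hbb, hn]
      rw [hshift]
      have hlen2 : (((b :: c :: t').length : Int)) = ((t'.length : Int) + 2) := by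
        push_cast [List.length_cons]; ring
      have := ih b c acc2
      rw [hlen2] at this
      exact this

lemma pvEmit_ne_nil (s : List (List (String × String))) (x : List (String × String))
    (hs : s ≠ []) : pvEmit s x ≠ [] := by
  unfold pvEmit
  split_ifs <;> simp_all

lemma pvEmit_last (s : List (List (String × String))) (x : List (String × String)) :
    PySem.List.pyGetD (s ++ [x]) (-1) [] = x := by
  rw [pvLastEq (s ++ [x]) (by simp) [] []]; simp

lemma pvEmit_idem (s : List (List (String × String))) (x : List (String × String)) :
    pvEmit (pvEmit s x) x = pvEmit s x := by
  by_cases h1 : pvKey (PySem.List.pyGetD s (-1) []) "station" ≠ pvKey x "station"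
      ∨ pvKey (PySem.List.pyGetD s (-1) []) "line" ≠ pvKey x "line"
  · have he : pvEmit s x = s ++ [x] := by unfold pvEmit; rw [if_pos h1]
    rw [he]
    unfold pvEmit
    rw [pvEmit_last, if_neg (by simp)]
  · have he : pvEmit s x = s := by unfold pvEmit; rw [if_neg h1]
    rw [he]
    exact he

lemma pvStepA_emit (s : List (List (String × String))) (pr cu nx : List (String × String)) :
    pvStepA s pr cu nx
      = if pvKey cu "line" ≠ pvKey pr "line" ∨ pvKey cu "line" ≠ pvKey nx "line"
        then pvEmit s cu else s := by
  unfold pvStepA pvEmit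
  split_ifs <;> tauto

-- MAIN: the edge-centric walk from the edge (c, nx) equals the window fold whose seed already
-- carries the pending left-endpoint emission of c
lemma pvWalk_main (t : List (List (String × String))) :
    ∀ (c nx : List (String × String)) (s : List (List (String × String))), s ≠ [] →
    pvWalkB s (c :: nx :: t)
      = (pvTriples (c :: nx :: t)).foldl (fun s tr => pvStepA s tr.1 tr.2.1 tr.2.2)
          (if pvKey nx "line" ≠ pvKey c "line" then pvEmit s c else s) := by
  induction t with
  | nil =>
      intro c nx s hs
      show pvWalkB (if pvKey nx "line" ≠ pvKey c "line" then
          let s' := pvEmit s c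
          if ([] : List (List (String × String))) ≠ [] then pvEmit s' nx else s'
        else s) [nx] = _
      simp [pvWalkB, pvTriples]
  | cons d t' ih =>
      intro c nx s hs
      have hstep : pvWalkB s (c :: nx :: d :: t')
          = pvWalkB (if pvKey nx "line" ≠ pvKey c "line" then pvEmit (pvEmit s c) nx else s)
              (nx :: d :: t') := by
        show pvWalkB (if pvKey nx "line" ≠ pvKey c "line" then
            let s' := pvEmit s c
            if (d :: t') ≠ [] then pvEmit s' nx else s'
          else s) (nx :: d :: t') = _
        simp
      rw [hstep]
      have hne : (if pvKey nx "line" ≠ pvKey c "line" then pvEmit (pvEmit s c) nx else s) ≠ [] := by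
        split_ifs with h
        · exact pvEmit_ne_nil _ _ (pvEmit_ne_nil _ _ hs)
        · exact hs
      rw [ih nx d _ hne]
      have htri : pvTriples (c :: nx :: d :: t') = (c, (nx, d)) :: pvTriples (nx :: d :: t') := by
        simp [pvTriples]
      rw [htri, List.foldl_cons]
      congr 1
      rw [pvStepA_emit]
      have hsym : (pvKey d "line" ≠ pvKey nx "line") ↔ (pvKey nx "line" ≠ pvKey d "line") :=
        ne_comm
      simp only [hsym]
      by_cases h1 : pvKey nx "line" ≠ pvKey c "line"
      · simp only [if_pos h1, if_pos (Or.inl h1)]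
        by_cases h2 : pvKey nx "line" ≠ pvKey d "line"
        · rw [if_pos h2, pvEmit_idem]
        · rw [if_neg h2]
      · simp only [if_neg h1]
        by_cases h2 : pvKey nx "line" ≠ pvKey d "line"
        · simp [h1, h2]
        · simp [h1, h2]

-- ===== VERDICT (by name: the statement is the Claim_ definition above) =====
theorem get_smart_path_spec : Claim_equal_get_smart_path := by
  intro fp _ _
  unfold Spec_get_smart_path
  match fp with
  | [] => rfl
  | [x] =>
      simp [get_smart_path, get_smart_path_alt,
        PySem.List.pyRange_one_eq_nil (show (0:Int) ≤ 1 by norm_num),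
        PySem.List.pyRange_one_eq_nil (show (1:Int) ≤ 2 by norm_num),
        pvLastEq [x] (by simp) ([] : List (String × String)) x]
  | [x, y] =>
      simp only [get_smart_path, get_smart_path_alt]
      rw [if_neg (show ¬([x, y] : List (List (String × String))) = [] by simp)]
      rw [if_neg (show ¬([x, y] : List (List (String × String))) = [] by simp)]
      rw [show (((([x, y] : List (List (String × String))).length) : Int) - 1) = 1 by simp]
      rw [show ((([x, y] : List (List (String × String))).length) : Int) = 2 by simp]
      rw [PySem.List.pyRange_one_eq_nil (le_refl (1 : Int)),
          PySem.List.pyRange_one_eq_nil (le_refl (2 : Int))]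
      simp only [List.foldl_nil]
      rw [if_neg (show ¬((3:Int) ≤ 2 ∧
            pvKey (PySem.List.pyGetD ([x, y] : List (List (String × String))) 1 []) "line"
              ≠ pvKey (PySem.List.pyGetD ([x, y] : List (List (String × String))) 0 []) "line")
          from fun h => absurd h.1 (by norm_num))]
  | x :: b :: d :: t =>
      simp only [get_smart_path, get_smart_path_alt]
      rw [if_neg (show ¬(x :: b :: d :: t) = [] by simp)]
      rw [if_neg (show ¬(x :: b :: d :: t) = [] by simp)]
      rw [pvGetD_zero, pvFoldIdx (d :: t) x b [x], pvFoldIdxB (d :: t) x b _]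
      have e1 : PySem.List.pyGetD (x :: b :: d :: t) 1 [] = b := by
        rw [pvShift _ _ 1 _ le_rfl, show (1 : Int) - 1 = 0 by norm_num, pvGetD_zero]
      have hpre : (if 3 ≤ (((x :: b :: d :: t).length : Int)) ∧
            pvKey (PySem.List.pyGetD (x :: b :: d :: t) 1 []) "line" ≠ pvKey x "line"
          then pvEmit [x] (PySem.List.pyGetD (x :: b :: d :: t) 1 []) else [x])
          = (if pvKey b "line" ≠ pvKey x "line" then pvEmit [x] b else [x]) := by
        rw [e1]
        have h3 : (3 : Int) ≤ (((x :: b :: d :: t).length : Int)) := by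
          push_cast [List.length_cons]; omega
        split_ifs with h1 h2 h3' <;> simp_all
      rw [hpre]
      rw [pvWalk_main t b d _ (by split_ifs with h; exacts [pvEmit_ne_nil _ _ (by simp), by simp])]
      have htri : pvTriples (x :: b :: d :: t) = (x, (b, d)) :: pvTriples (b :: d :: t) := by
        simp [pvTriples]
      rw [htri, List.foldl_cons]
      have hseed : (if pvKey d "line" ≠ pvKey b "line"
            then pvEmit (if pvKey b "line" ≠ pvKey x "line" then pvEmit [x] b else [x]) b
            else (if pvKey b "line" ≠ pvKey x "line" then pvEmit [x] b else [x]))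
          = pvStepA [x] x b d := by
        rw [pvStepA_emit]
        have hsym : (pvKey d "line" ≠ pvKey b "line") ↔ (pvKey b "line" ≠ pvKey d "line") :=
          ne_comm
        simp only [hsym]
        by_cases h1 : pvKey b "line" ≠ pvKey x "line"
        · simp only [if_pos h1, if_pos (Or.inl h1)]
          by_cases h2 : pvKey b "line" ≠ pvKey d "line"
          · rw [if_pos h2, pvEmit_idem]
          · rw [if_neg h2]
        · simp only [if_neg h1]
          by_cases h2 : pvKey b "line" ≠ pvKey d "line"
          · simp [h1, h2]
          · simp [h1, h2]
      rw [hseed]
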